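-- pv_equiv track=rewrite | github.com/Kimbongsik/u-eMuESL | elfParser.py | check_list
-- ===== SOURCE A (Python) =====
-- def check_list(list_input):
--     i = 0
--     a = len(list_input)-1
--     while i < a:
--         if list_input[i][1] == list_input[i+1][1]:
--             del list_input[i+1]
--             a = a - 1
--             i = i + 1
--         i = i + 1
--     return list_input
-- ===== SOURCE B (Python) =====
-- def check_list(list_input):
--     # Single forward pass over the original list building a new output list,
--     # replicating A's skip-after-delete index logic. Does not mutate the input.
--     out = []
--     n = len(list_input)
--     i = 0
--     while i < n - 1:
--         x = list_input[i]
--         if x[1] == list_input[i + 1][1]: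
--             out.append(x)
--             if i + 2 < n:
--                 out.append(list_input[i + 2])
--             i += 3
--         else:
--             out.append(x)
--             i += 1
--     if i < n:
--         out.append(list_input[i])
--     return out
-- ===== Notes on version B (the rewrite author's own statement) =====
-- stated objective: alternative
-- what changed: B replaces A's in-place while-loop with del-based deletions by a single forward pass over the original (unmodified) list that builds a fresh output list, replicating the same skip-after-delete index steps.
-- outside the precondition, e.g. on check_list([[0, 1], [2, 1], [3]]): A returns [[0, 1], [3]], B returns [[0, 1], [3]]; on check_list([[]]): A returns [[]], B returns [[]]
import Mathlib
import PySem

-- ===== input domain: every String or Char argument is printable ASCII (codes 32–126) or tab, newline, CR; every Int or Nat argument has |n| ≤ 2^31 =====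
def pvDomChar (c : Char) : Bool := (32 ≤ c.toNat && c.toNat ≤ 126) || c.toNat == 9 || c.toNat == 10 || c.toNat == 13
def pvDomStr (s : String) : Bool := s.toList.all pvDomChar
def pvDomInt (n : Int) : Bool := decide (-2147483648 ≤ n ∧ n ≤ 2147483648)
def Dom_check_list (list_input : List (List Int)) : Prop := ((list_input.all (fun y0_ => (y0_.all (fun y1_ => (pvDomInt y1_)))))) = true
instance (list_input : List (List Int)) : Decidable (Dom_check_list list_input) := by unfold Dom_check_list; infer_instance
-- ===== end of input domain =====

-- B builds a fresh output list in one forward pass over the original list instead of A's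
-- in-place del-based deletions; A mutates list_input in place, B does not — the equivalence
-- proved here is about the RETURN value only.

-- ===== PORT A =====
-- while i < a: compare list_input[i][1] with list_input[i+1][1]; on equality del list_input[i+1],
-- a -= 1, i += 1; then i += 1.  'raise' (a row shorter than 2) returns the current list, a value
-- never claimed (outside Pre_).
def pvDelLoop (lst : List (List Int)) (i a : Nat) : List (List Int) :=
  if i < a then
    match lst[i]?.bind (fun r => PySem.List.pyGet? r 1),
          lst[i+1]?.bind (fun r => PySem.List.pyGet? r 1) with
    | some v1, some v2 =>
      if v1 = v2 then pvDelLoop (lst.eraseIdx (i+1)) (i+2) (a-1)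
      else pvDelLoop lst (i+1) a
    | _, _ => lst
  else lst
termination_by a - i
decreasing_by all_goals omega

def check_list (list_input : List (List Int)) : List (List Int) :=
  pvDelLoop list_input 0 (list_input.length - 1)

-- ===== PORT B =====
-- single forward pass over the ORIGINAL list, appending to `out`; on an equal pair it emits the
-- kept row and passes the row after the dropped one straight through (i += 3), else i += 1.
def pvScanLoop (lst : List (List Int)) (n i : Nat) (out : List (List Int)) : List (List Int) :=
  if i < n - 1 then
    match lst[i]?.bind (fun r => PySem.List.pyGet? r 1),
          lst[i+1]?.bind (fun r => PySem.List.pyGet? r 1) with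
    | some v1, some v2 =>
      if v1 = v2 then
        pvScanLoop lst n (i+3)
          (if i + 2 < n then out ++ lst[i]?.toList ++ lst[i+2]?.toList
           else out ++ lst[i]?.toList)
      else pvScanLoop lst n (i+1) (out ++ lst[i]?.toList)
    | _, _ => out
  else if i < n then out ++ lst[i]?.toList else out
termination_by n - i
decreasing_by all_goals omega

def check_list_alt (list_input : List (List Int)) : List (List Int) :=
  pvScanLoop list_input list_input.length 0 []

-- ===== PRECONDITION & SPEC =====
-- Pre_ requires every row to have length ≥ 2: a shorter row raises IndexError in A when its
-- second field is read.  Which rows are actually read depends on the run (a row right after a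
-- deleted one is skipped), so this uniform bound is slightly narrower than A's exact domain:
-- it also excludes some inputs A returns on (short rows that are never read) — B returns the
-- same value there (see claim cites).
def Pre_check_list (list_input : List (List Int)) : Prop :=
  ∀ r ∈ list_input, 2 ≤ r.length
instance (list_input : List (List Int)) : Decidable (Pre_check_list list_input) := by
  unfold Pre_check_list; infer_instance

def pvWitness_check_list : List (List Int) := [[1, 2], [3, 2], [4, 5]]

def Spec_check_list (list_input : List (List Int)) (out : List (List Int)) : Prop :=
  out = check_list_alt list_input
instance (list_input : List (List Int)) (out : List (List Int)) : Decidable (Spec_check_list list_input out) := by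
  unfold Spec_check_list; infer_instance

-- ===== CLAIM (what is proved, stated in full; the proofs are below) =====
def Claim_equal_check_list : Prop :=
  ∀ (list_input : List (List Int)), Dom_check_list list_input →
    Pre_check_list list_input → Spec_check_list list_input (check_list list_input)

-- ===== LEMMAS AND PROOFS =====

-- The common functional specification both ports are reduced to.
def pvF (l : List (List Int)) : List (List Int) :=
  match l with
  | [] => []
  | [x] => [x]
  | x :: y :: rest =>
    match PySem.List.pyGet? x 1, PySem.List.pyGet? y 1 with
    | some v1, some v2 =>
      if v1 = v2 then x :: (rest.take 1 ++ pvF (rest.drop 1))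
      else x :: pvF (y :: rest)
    | _, _ => x :: y :: rest
termination_by l.length
decreasing_by all_goals simp <;> omega

theorem pvGet1 (r : List Int) (h : 2 ≤ r.length) :
    PySem.List.pyGet? r 1 = some r[1] := by
  match r, h with
  | a :: b :: t, _ => simp [PySem.List.pyGet?, PySem.List.pyIdx?]

theorem pvF_eq2 {v1 v2 : Int} (x y : List Int) (rest : List (List Int))
    (h1 : PySem.List.pyGet? x 1 = some v1) (h2 : PySem.List.pyGet? y 1 = some v2) :
    pvF (x :: y :: rest)
      = if v1 = v2 then x :: (rest.take 1 ++ pvF (rest.drop 1))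
        else x :: pvF (y :: rest) := by
  rw [pvF]
  rw [h1, h2]

theorem pvGetMid {α : Type} (pre l : List α) (k : Nat) :
    (pre ++ l)[pre.length + k]? = l[k]? := by
  rw [List.getElem?_append_right (by omega)]
  simp

theorem pvDelLoop_eq (m : Nat) : ∀ (pre l : List (List Int)), l.length ≤ m →
    (∀ r ∈ l, 2 ≤ r.length) →
    pvDelLoop (pre ++ l) pre.length ((pre ++ l).length - 1) = pre ++ pvF l := by
  induction m with
  | zero =>
    intro pre l hm _
    have : l = [] := List.length_eq_zero_iff.mp (by omega)
    subst this
    rw [pvDelLoop]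
    simp [pvF]
  | succ m ih =>
    intro pre l hm hpre
    match l with
    | [] => rw [pvDelLoop]; simp [pvF]
    | [x] => rw [pvDelLoop]; simp [pvF]
    | x :: y :: rest =>
      have hx : 2 ≤ x.length := hpre x (by simp)
      have hy : 2 ≤ y.length := hpre y (by simp)
      have hgx : (pre ++ x :: y :: rest)[pre.length]? = some x := by
        have := pvGetMid pre (x :: y :: rest) 0; simpa using this
      have hgy : (pre ++ x :: y :: rest)[pre.length + 1]? = some y := by
        have := pvGetMid pre (x :: y :: rest) 1; simpa using this
      rw [pvDelLoop]
      rw [if_pos (by simp <;> omega)]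
      rw [hgx, hgy]
      simp only [Option.bind_some, pvGet1 x hx, pvGet1 y hy]
      rw [pvF_eq2 x y rest (pvGet1 x hx) (pvGet1 y hy)]
      by_cases hv : x[1] = y[1]
      · rw [if_pos hv, if_pos hv]
        have herase : (pre ++ x :: y :: rest).eraseIdx (pre.length + 1)
            = (pre ++ [x]) ++ rest := by
          have h : pre.length + 1 + 1 - pre.length = 2 := by omega
          simp [List.eraseIdx_eq_take_drop_succ, List.take_append, List.drop_append,
            List.take_of_length_le, h]
          omega
        rw [herase]
        match rest with
        | [] =>
          rw [pvDelLoop]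
          rw [if_neg (by simp <;> omega)]
          simp [pvF]
        | z :: r' =>
          have h1 : pre.length + 2 = ((pre ++ [x]) ++ [z]).length := by simp
          have h2 : (pre ++ [x]) ++ z :: r' = ((pre ++ [x]) ++ [z]) ++ r' := by simp
          have h3 : (pre ++ x :: y :: z :: r').length - 1 - 1
              = (((pre ++ [x]) ++ [z]) ++ r').length - 1 := by simp
          rw [h2, h1, h3]
          rw [ih ((pre ++ [x]) ++ [z]) r' (by simp only [List.length_cons] at hm; omega)
            (fun r hr => hpre r (by simp [hr]))]
          simp
      · rw [if_neg hv, if_neg hv]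
        have h1 : pre.length + 1 = (pre ++ [x]).length := by simp
        have h2 : pre ++ x :: y :: rest = (pre ++ [x]) ++ y :: rest := by simp
        rw [h1, h2]
        rw [ih (pre ++ [x]) (y :: rest)
          (by simp only [List.length_cons] at hm ⊢; omega)
          (fun r hr => hpre r (by simp at hr ⊢; tauto))]
        simp

theorem pvScanLoop_eq (m : Nat) : ∀ (pre l out : List (List Int)), l.length ≤ m →
    (∀ r ∈ l, 2 ≤ r.length) →
    pvScanLoop (pre ++ l) (pre ++ l).length pre.length out = out ++ pvF l := by
  induction m with
  | zero =>
    intro pre l out hm _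
    have : l = [] := List.length_eq_zero_iff.mp (by omega)
    subst this
    rw [pvScanLoop]
    simp [pvF]
  | succ m ih =>
    intro pre l out hm hpre
    match l with
    | [] => rw [pvScanLoop]; simp [pvF]
    | [x] =>
      have hgx : (pre ++ [x])[pre.length]? = some x := by
        have := pvGetMid pre [x] 0; simpa using this
      rw [pvScanLoop]
      rw [if_neg (by simp)]
      rw [if_pos (by simp)]
      simp [pvF, hgx]
    | x :: y :: rest =>
      have hx : 2 ≤ x.length := hpre x (by simp)
      have hy : 2 ≤ y.length := hpre y (by simp)
      have hgx : (pre ++ x :: y :: rest)[pre.length]? = some x := by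
        have := pvGetMid pre (x :: y :: rest) 0; simpa using this
      have hgy : (pre ++ x :: y :: rest)[pre.length + 1]? = some y := by
        have := pvGetMid pre (x :: y :: rest) 1; simpa using this
      rw [pvScanLoop]
      rw [if_pos (by simp <;> omega)]
      rw [hgx, hgy]
      simp only [Option.bind_some, pvGet1 x hx, pvGet1 y hy]
      rw [pvF_eq2 x y rest (pvGet1 x hx) (pvGet1 y hy)]
      by_cases hv : x[1] = y[1]
      · rw [if_pos hv, if_pos hv]
        match rest with
        | [] =>
          rw [if_neg (by simp)]
          rw [pvScanLoop]
          rw [if_neg (by simp)]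
          rw [if_neg (by simp)]
          simp [pvF, hgx]
        | z :: r' =>
          rw [if_pos (by simp <;> omega)]
          have hgz : (pre ++ x :: y :: z :: r')[pre.length + 2]? = some z := by
            have := pvGetMid pre (x :: y :: z :: r') 2; simpa using this
          rw [hgz]
          have h1 : pre.length + 3 = (pre ++ [x, y, z]).length := by simp
          have h2 : pre ++ x :: y :: z :: r' = (pre ++ [x, y, z]) ++ r' := by simp
          rw [h1, h2]
          rw [ih (pre ++ [x, y, z]) r' _ (by simp only [List.length_cons] at hm; omega)
            (fun r hr => hpre r (by simp [hr]))]
          simp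
      · rw [if_neg hv, if_neg hv]
        have h1 : pre.length + 1 = (pre ++ [x]).length := by simp
        have h2 : pre ++ x :: y :: rest = (pre ++ [x]) ++ y :: rest := by simp
        rw [h1, h2]
        rw [ih (pre ++ [x]) (y :: rest) _
          (by simp only [List.length_cons] at hm ⊢; omega)
          (fun r hr => hpre r (by simp at hr ⊢; tauto))]
        simp

-- ===== VERDICT (by name: the statement is the Claim_ definition above) =====
theorem check_list_spec : Claim_equal_check_list := by
  intro l _ hpre
  unfold Spec_check_list check_list check_list_alt
  have hA := pvDelLoop_eq l.length [] l le_rfl hpre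
  have hB := pvScanLoop_eq l.length [] l [] le_rfl hpre
  simp at hA hB
  rw [hA, hB]
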